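-- pv_equiv track=rewrite | github.com/asmeet3/image-encryption-rsa | image_rsa.py | decrypt_image_binary
-- ===== SOURCE A (Python) =====
-- def decrypt_image_binary(ciphertext, d, n):
--     plaintext_binary = []
--     for row in ciphertext:
--         decrypted_row = []
--         for pixel in row:
--             decrypted_pixel = [format(pow(value, d, n), '08b') for value in pixel]
--             decrypted_row.append(decrypted_pixel)
--         plaintext_binary.append(decrypted_row)
--     return plaintext_binary
-- ===== SOURCE B (Python) =====
-- def decrypt_image_binary(ciphertext, d, n):
--     # Staged passes: flatten the image to one channel stream, build a decryption
--     # table with one modexp per distinct value, map the stream, then reshape.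
--     flat = [v for row in ciphertext for pixel in row for v in pixel]
--     table = {v: format(pow(v, d, n), '08b') for v in dict.fromkeys(flat)}
--     it = iter(table[v] for v in flat)
--     return [[[next(it) for _ in pixel] for pixel in row] for row in ciphertext]
-- ===== Notes on version B (the rewrite author's own statement) =====
-- stated objective: faster
-- what changed: B replaces A's single nested traversal by four staged passes: flatten the image into one flat channel list, build a lookup table with one modular exponentiation per distinct value (dict.fromkeys dedup), map the flat list through the table, and reshape the flat results back into the original nested structure.
import Mathlib
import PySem

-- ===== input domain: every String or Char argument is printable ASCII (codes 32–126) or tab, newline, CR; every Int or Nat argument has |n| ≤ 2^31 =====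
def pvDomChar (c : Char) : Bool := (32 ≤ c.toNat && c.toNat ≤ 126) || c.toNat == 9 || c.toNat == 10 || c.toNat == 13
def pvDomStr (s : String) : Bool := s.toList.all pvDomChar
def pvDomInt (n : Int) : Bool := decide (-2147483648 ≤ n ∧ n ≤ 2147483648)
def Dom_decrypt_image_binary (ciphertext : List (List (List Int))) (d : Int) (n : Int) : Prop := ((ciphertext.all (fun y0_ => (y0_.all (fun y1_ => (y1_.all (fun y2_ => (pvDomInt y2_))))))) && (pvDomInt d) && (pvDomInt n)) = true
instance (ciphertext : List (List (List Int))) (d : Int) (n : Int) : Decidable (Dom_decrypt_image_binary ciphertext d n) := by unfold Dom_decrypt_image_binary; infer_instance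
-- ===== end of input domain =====

-- B decrypts in staged passes: flatten to one channel stream, build a table with one
-- modexp per distinct value, map the stream through the table, reshape to the nesting.

-- shared helper: Python's pow(v, d, n) for d possibly negative (CPython inverts v mod n
-- first; any Bezout representative works since powMod reduces mod n). Exact on Pre_
-- (n ≠ 0, and for d < 0 every value invertible mod n — elsewhere Python raises ValueError).
def pvPowMod (v d n : Int) : Int :=
  if d < 0 then PySem.Int.powMod (Int.gcdA v n) (-d).toNat n
  else PySem.Int.powMod v d.toNat n

-- shared helper: format(x, '08b')
def pvFmt08b (x : Int) : String := PySem.Str.zfill (PySem.Int.toBin x) 8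

-- ===== PORT A =====
def decrypt_image_binary (ciphertext : List (List (List Int))) (d : Int) (n : Int) : List (List (List String)) :=
  ciphertext.foldl
    (fun plaintext_binary row =>
      plaintext_binary ++
        [row.foldl
          (fun decrypted_row pixel =>
            decrypted_row ++ [pixel.map (fun value => pvFmt08b (pvPowMod value d n))])
          []])
    []

-- ===== PORT B =====
-- next(it): the stream has exactly one entry per channel, so the [] case (StopIteration)
-- is never reached on B's call
def pvNext (s : List String) : String × List String :=
  match s with
  | [] => ("", [])
  | x :: rest => (x, rest)

-- [next(it) for _ in pixel]
def pvTakePixel : List Int → List String → List String × List String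
  | [], s => ([], s)
  | _ :: ps, s =>
    let p := pvNext s
    let q := pvTakePixel ps p.2
    (p.1 :: q.1, q.2)

-- [[next(it) for _ in pixel] for pixel in row]
def pvTakeRow : List (List Int) → List String → List (List String) × List String
  | [], s => ([], s)
  | pixel :: ps, s =>
    let p := pvTakePixel pixel s
    let q := pvTakeRow ps p.2
    (p.1 :: q.1, q.2)

-- the full reshape comprehension
def pvTakeImage : List (List (List Int)) → List String → List (List (List String)) × List String
  | [], s => ([], s)
  | row :: rs, s =>
    let p := pvTakeRow row s
    let q := pvTakeImage rs p.2
    (p.1 :: q.1, q.2)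

def decrypt_image_binary_alt (ciphertext : List (List (List Int))) (d : Int) (n : Int) : List (List (List String)) :=
  let flat := ciphertext.flatMap (fun row => row.flatMap (fun pixel => pixel))
  let table := (PySem.List.dedup flat).foldl
    (fun t v => t.insert v (pvFmt08b (pvPowMod v d n))) PySem.Dict.empty
  -- table[v]: exact, every v of flat is a key of table (getD default never used)
  let stream := flat.map (fun v => (table.get? v).getD "")
  (pvTakeImage ciphertext stream).1

-- ===== PRECONDITION & SPEC =====
-- Pre_ excludes exactly the inputs where Python's pow raises ValueError: some channel
-- value with n = 0, or with d < 0 and the value not invertible mod n.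
def Pre_decrypt_image_binary (ciphertext : List (List (List Int))) (d : Int) (n : Int) : Prop :=
  ∀ row ∈ ciphertext, ∀ pixel ∈ row, ∀ v ∈ pixel, n ≠ 0 ∧ (0 ≤ d ∨ Int.gcd v n = 1)
instance (ciphertext : List (List (List Int))) (d : Int) (n : Int) : Decidable (Pre_decrypt_image_binary ciphertext d n) := by unfold Pre_decrypt_image_binary; infer_instance

def pvWitness_decrypt_image_binary : List (List (List Int)) × Int × Int := ([[[2, 250, 2]]], 3, 255)

def Spec_decrypt_image_binary (ciphertext : List (List (List Int))) (d : Int) (n : Int) (out : List (List (List String))) : Prop := out = decrypt_image_binary_alt ciphertext d n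
instance (ciphertext : List (List (List Int))) (d : Int) (n : Int) (out : List (List (List String))) : Decidable (Spec_decrypt_image_binary ciphertext d n out) := by unfold Spec_decrypt_image_binary; infer_instance

-- ===== CLAIM (what is proved, stated in full; the proofs are below) =====
def Claim_equal_decrypt_image_binary : Prop := ∀ (ciphertext : List (List (List Int))) (d : Int) (n : Int), Dom_decrypt_image_binary ciphertext d n → Pre_decrypt_image_binary ciphertext d n → Spec_decrypt_image_binary ciphertext d n (decrypt_image_binary ciphertext d n)

-- ===== LEMMAS AND PROOFS =====

-- A unfolds to the plain triple map
theorem decrypt_A_eq_map (ciphertext : List (List (List Int))) (d n : Int) :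
    decrypt_image_binary ciphertext d n =
      ciphertext.map (fun row => row.map (fun pixel => pixel.map (fun v => pvFmt08b (pvPowMod v d n)))) := by
  unfold decrypt_image_binary
  rw [PySem.List.foldl_append_singleton_eq_map]
  refine List.map_congr_left (fun row _ => ?_)
  rw [PySem.List.foldl_append_singleton_eq_map]
  simp

-- the table built over a list maps every member to its format string
theorem pvTable_get (d n : Int) (l : List Int) (v : Int) (hv : v ∈ l) :
    ((l.foldl (fun t u => t.insert u (pvFmt08b (pvPowMod u d n))) PySem.Dict.empty).get? v)
      = some (pvFmt08b (pvPowMod v d n)) := by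
  induction l using List.reverseRecOn with
  | nil => cases hv
  | append_singleton l x ih =>
    rw [List.foldl_append]
    simp only [List.foldl_cons, List.foldl_nil]
    rw [PySem.Dict.get?_insert]
    by_cases hvx : x = v
    · simp [hvx]
    · have : v ∈ l := by
        rcases List.mem_append.mp hv with h | h
        · exact h
        · simp at h; exact absurd h.symm hvx
      simp only [ih this]
      split_ifs with h
      · exact absurd h.symm hvx
      · rfl

-- reshape lemmas: consuming exactly the mapped flattening leaves the rest untouched
theorem pvTakePixel_spec (g : Int → String) (pixel : List Int) (rest : List String) :
    pvTakePixel pixel (pixel.map g ++ rest) = (pixel.map g, rest) := by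
  induction pixel with
  | nil => rfl
  | cons v ps ih => simp [pvTakePixel, pvNext, ih]

theorem pvTakeRow_spec (g : Int → String) (row : List (List Int)) (rest : List String) :
    pvTakeRow row (row.flatten.map g ++ rest)
      = (row.map (fun pixel => pixel.map g), rest) := by
  induction row with
  | nil => rfl
  | cons pixel ps ih =>
    simp only [List.flatten_cons, List.map_append, List.append_assoc, pvTakeRow]
    rw [pvTakePixel_spec, ih]; simp

theorem pvTakeImage_spec (g : Int → String) (cip : List (List (List Int))) (rest : List String) :
    pvTakeImage cip ((cip.flatMap (fun row => row.flatten)).map g ++ rest)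
      = (cip.map (fun row => row.map (fun pixel => pixel.map g)), rest) := by
  induction cip with
  | nil => rfl
  | cons row rs ih =>
    simp only [List.flatMap_cons, List.map_append, List.append_assoc, pvTakeImage]
    rw [pvTakeRow_spec, ih]; simp

-- ===== VERDICT (by name: the statement is the Claim_ definition above) =====
theorem decrypt_image_binary_spec : Claim_equal_decrypt_image_binary := by
  intro ciphertext d n _ _
  unfold Spec_decrypt_image_binary decrypt_image_binary_alt
  simp only [show (fun (row : List (List Int)) => row.flatMap (fun pixel => pixel))
      = (fun (row : List (List Int)) => row.flatten) from funext (fun r => by simp)]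
  have hstream :
      (ciphertext.flatMap (fun row => row.flatten)).map
        (fun v => (((PySem.List.dedup (ciphertext.flatMap (fun row => row.flatten))).foldl
            (fun t u => t.insert u (pvFmt08b (pvPowMod u d n))) PySem.Dict.empty).get? v).getD "")
      = (ciphertext.flatMap (fun row => row.flatten)).map
          (fun v => pvFmt08b (pvPowMod v d n)) := by
    refine List.map_congr_left (fun v hv => ?_)
    rw [pvTable_get d n _ v (by rw [PySem.List.mem_dedup]; exact hv)]
    rfl
  rw [hstream]
  have := pvTakeImage_spec (fun v => pvFmt08b (pvPowMod v d n)) ciphertext []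
  rw [List.append_nil] at this
  rw [this, decrypt_A_eq_map]
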